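-- pv_equiv track=rewrite | github.com/wuxiyang1996/Multi-hop-Reasoning-VLM-Agent | env_wrappers/sokoban_nl_wrapper.py | summarize_elements
-- ===== SOURCE A (Python) =====
-- from typing import Any, Callable, Dict, List, Optional, Tuple, Union
--
-- def summarize_elements(grid: List[List[str]]) -> str:
--     """List positions of key elements for quick reference."""
--     player_pos = []
--     boxes = []
--     targets = []
--     boxes_on_target = []
--
--     for r, row in enumerate(grid):
--         for c, ch in enumerate(row):
--             if ch == "@":
--                 player_pos.append((r, c))
--             elif ch == "+":
--                 player_pos.append((r, c))
--                 targets.append((r, c))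
--             elif ch == "$":
--                 boxes.append((r, c))
--             elif ch == "?":
--                 targets.append((r, c))
--             elif ch == "*":
--                 boxes_on_target.append((r, c))
--
--     parts = []
--     if player_pos:
--         parts.append(f"Player: {player_pos[0]}")
--     if boxes:
--         parts.append(f"Boxes on floor: {boxes}")
--     if targets:
--         parts.append(f"Empty targets: {targets}")
--     if boxes_on_target:
--         parts.append(f"Boxes on target (solved): {boxes_on_target}")
--     total_boxes = len(boxes) + len(boxes_on_target)
--     total_targets = len(targets) + len(boxes_on_target)
--     parts.append(f"Progress: {len(boxes_on_target)}/{total_targets} targets filled")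
--     return "\n".join(parts)
-- ===== SOURCE B (Python) =====
-- def summarize_elements(grid):
--     """List positions of key elements for quick reference."""
--     cells = [((r, c), ch) for r, row in enumerate(grid) for c, ch in enumerate(row)]
--
--     def select(chars):
--         return [pos for pos, ch in cells if ch in chars]
--
--     player_pos = select(("@", "+"))
--     boxes = select(("$",))
--     targets = select(("+", "?"))
--     boxes_on_target = select(("*",))
--
--     parts = []
--     if player_pos:
--         parts.append(f"Player: {player_pos[0]}")
--     if boxes:
--         parts.append(f"Boxes on floor: {boxes}")
--     if targets:
--         parts.append(f"Empty targets: {targets}")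
--     if boxes_on_target:
--         parts.append(f"Boxes on target (solved): {boxes_on_target}")
--     total_targets = len(targets) + len(boxes_on_target)
--     parts.append(f"Progress: {len(boxes_on_target)}/{total_targets} targets filled")
--     return "\n".join(parts)
-- ===== Notes on version B (the rewrite author's own statement) =====
-- stated objective: alternative
-- what changed: Replaces the single nested loop with an elif dispatch appending to four accumulators by a flattened row-major cell list built once plus four independent membership-filter selections (the dual-role '+' simply appears in two selections); the formatting block is unchanged.
import Mathlib
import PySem

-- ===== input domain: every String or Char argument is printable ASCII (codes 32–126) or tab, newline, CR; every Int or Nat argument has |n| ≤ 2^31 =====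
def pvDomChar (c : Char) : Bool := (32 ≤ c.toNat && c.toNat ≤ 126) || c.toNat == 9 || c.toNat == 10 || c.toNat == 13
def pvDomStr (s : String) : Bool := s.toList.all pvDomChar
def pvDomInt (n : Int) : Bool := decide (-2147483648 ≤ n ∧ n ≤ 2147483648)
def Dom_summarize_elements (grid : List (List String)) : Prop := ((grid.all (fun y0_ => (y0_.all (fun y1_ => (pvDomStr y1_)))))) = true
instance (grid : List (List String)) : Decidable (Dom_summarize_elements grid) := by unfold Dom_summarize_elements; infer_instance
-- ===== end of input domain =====

-- B replaces A's single nested loop with elif dispatch by a flat cell list and four membership filters; same output (alternative decomposition, not faster).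

-- shared formatting helpers (both Pythons format tuples/lists with identical f-strings)
def pvFmtPair (p : Int × Int) : String :=
  "(" ++ PySem.Int.toStr p.1 ++ ", " ++ PySem.Int.toStr p.2 ++ ")"

def pvFmtList (xs : List (Int × Int)) : String :=
  "[" ++ PySem.Str.join ", " (xs.map pvFmtPair) ++ "]"

-- shared tail: the parts/formatting block, identical in A and B
def pvRender (player_pos boxes targets boxes_on_target : List (Int × Int)) : String :=
  let parts : List String := []
  let parts := match player_pos with
    | p :: _ => parts ++ ["Player: " ++ pvFmtPair p]
    | [] => parts
  let parts := if boxes ≠ [] then parts ++ ["Boxes on floor: " ++ pvFmtList boxes] else parts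
  let parts := if targets ≠ [] then parts ++ ["Empty targets: " ++ pvFmtList targets] else parts
  let parts := if boxes_on_target ≠ [] then parts ++ ["Boxes on target (solved): " ++ pvFmtList boxes_on_target] else parts
  let total_targets : Int := (targets.length : Int) + (boxes_on_target.length : Int)
  let parts := parts ++ ["Progress: " ++ PySem.Int.toStr (boxes_on_target.length : Int) ++ "/" ++ PySem.Int.toStr total_targets ++ " targets filled"]
  PySem.Str.join "\n" parts

-- ===== PORT A =====
-- the elif chain of A's inner loop body
def pvStepA (st : List (Int × Int) × List (Int × Int) × List (Int × Int) × List (Int × Int))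
    (pos : Int × Int) (ch : String) :
    List (Int × Int) × List (Int × Int) × List (Int × Int) × List (Int × Int) :=
  let (p, b, t, bt) := st
  if ch = "@" then (p ++ [pos], b, t, bt)
  else if ch = "+" then (p ++ [pos], b, t ++ [pos], bt)
  else if ch = "$" then (p, b ++ [pos], t, bt)
  else if ch = "?" then (p, b, t ++ [pos], bt)
  else if ch = "*" then (p, b, t, bt ++ [pos])
  else st

def summarize_elements (grid : List (List String)) : String :=
  let st := (PySem.List.enumerate grid).foldl
    (fun st rrow =>
      (PySem.List.enumerate rrow.2).foldl
        (fun st cch => pvStepA st (rrow.1, cch.1) cch.2) st)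
    (([], [], [], []) : List (Int × Int) × List (Int × Int) × List (Int × Int) × List (Int × Int))
  let (player_pos, boxes, targets, boxes_on_target) := st
  pvRender player_pos boxes targets boxes_on_target

-- ===== PORT B =====
def pvCells (grid : List (List String)) : List ((Int × Int) × String) :=
  (PySem.List.enumerate grid).flatMap
    (fun rrow => (PySem.List.enumerate rrow.2).map (fun cch => ((rrow.1, cch.1), cch.2)))

def pvSelect (cells : List ((Int × Int) × String)) (chars : List String) : List (Int × Int) :=
  (cells.filter (fun pc => pc.2 ∈ chars)).map (fun pc => pc.1)

def summarize_elements_alt (grid : List (List String)) : String :=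
  let cells := pvCells grid
  let player_pos := pvSelect cells ["@", "+"]
  let boxes := pvSelect cells ["$"]
  let targets := pvSelect cells ["+", "?"]
  let boxes_on_target := pvSelect cells ["*"]
  pvRender player_pos boxes targets boxes_on_target

-- ===== PRECONDITION & SPEC =====
def Spec_summarize_elements (grid : List (List String)) (out : String) : Prop := out = summarize_elements_alt grid
instance (grid : List (List String)) (out : String) : Decidable (Spec_summarize_elements grid out) := by unfold Spec_summarize_elements; infer_instance

-- ===== CLAIM (what is proved, stated in full; the proofs are below) =====
def Claim_equal_summarize_elements : Prop := ∀ (grid : List (List String)), Dom_summarize_elements grid → Spec_summarize_elements grid (summarize_elements grid)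

-- ===== LEMMAS AND PROOFS =====

theorem pvSelect_cons (pos : Int × Int) (ch : String)
    (tl : List ((Int × Int) × String)) (chars : List String) :
    pvSelect ((pos, ch) :: tl) chars =
      if ch ∈ chars then pos :: pvSelect tl chars else pvSelect tl chars := by
  simp [pvSelect, List.filter_cons]
  split_ifs <;> simp_all

-- A's fold over a flat cell list appends exactly the four selections
theorem pvFoldA_eq (l : List ((Int × Int) × String))
    (p b t bt : List (Int × Int)) :
    l.foldl (fun st pc => pvStepA st pc.1 pc.2) (p, b, t, bt) =
      (p ++ pvSelect l ["@", "+"], b ++ pvSelect l ["$"],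
       t ++ pvSelect l ["+", "?"], bt ++ pvSelect l ["*"]) := by
  induction l generalizing p b t bt with
  | nil => simp [pvSelect]
  | cons hd tl ih =>
    obtain ⟨pos, ch⟩ := hd
    rw [List.foldl_cons]
    by_cases h1 : ch = "@"
    · have hs : pvStepA (p, b, t, bt) pos ch = (p ++ [pos], b, t, bt) := by
        simp [pvStepA, h1]
      rw [hs, ih]; simp [pvSelect_cons, h1]
    by_cases h2 : ch = "+"
    · have hs : pvStepA (p, b, t, bt) pos ch = (p ++ [pos], b, t ++ [pos], bt) := by
        simp [pvStepA, h1, h2]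
      rw [hs, ih]; simp [pvSelect_cons, h1, h2]
    by_cases h3 : ch = "$"
    · have hs : pvStepA (p, b, t, bt) pos ch = (p, b ++ [pos], t, bt) := by
        simp [pvStepA, h1, h2, h3]
      rw [hs, ih]; simp [pvSelect_cons, h1, h2, h3]
    by_cases h4 : ch = "?"
    · have hs : pvStepA (p, b, t, bt) pos ch = (p, b, t ++ [pos], bt) := by
        simp [pvStepA, h1, h2, h3, h4]
      rw [hs, ih]; simp [pvSelect_cons, h1, h2, h3, h4]
    by_cases h5 : ch = "*"
    · have hs : pvStepA (p, b, t, bt) pos ch = (p, b, t, bt ++ [pos]) := by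
        simp [pvStepA, h1, h2, h3, h4, h5]
      rw [hs, ih]; simp [pvSelect_cons, h1, h2, h3, h4, h5]
    · have hs : pvStepA (p, b, t, bt) pos ch = (p, b, t, bt) := by
        simp [pvStepA, h1, h2, h3, h4, h5]
      rw [hs, ih]; simp [pvSelect_cons, h1, h2, h3, h4, h5]

-- A's nested fold is the flat fold over pvCells
theorem pvNested_eq (grid : List (List String)) :
    (PySem.List.enumerate grid).foldl
      (fun st rrow =>
        (PySem.List.enumerate rrow.2).foldl
          (fun st cch => pvStepA st (rrow.1, cch.1) cch.2) st)
      (([], [], [], []) : List (Int × Int) × List (Int × Int) × List (Int × Int) × List (Int × Int)) =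
    (pvCells grid).foldl (fun st pc => pvStepA st pc.1 pc.2)
      (([], [], [], []) : List (Int × Int) × List (Int × Int) × List (Int × Int) × List (Int × Int)) := by
  rw [pvCells, List.foldl_flatMap]
  simp [List.foldl_map]

-- ===== VERDICT (by name: the statement is the Claim_ definition above) =====
theorem summarize_elements_spec : Claim_equal_summarize_elements := by
  intro grid _
  show summarize_elements grid = summarize_elements_alt grid
  rw [summarize_elements, summarize_elements_alt]
  rw [pvNested_eq, pvFoldA_eq]
  simp
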